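-- pv_equiv track=rewrite | github.com/RoveAllOverTheWorld512/selestock | peaks2.py | get_peaks_troughs1
-- ===== SOURCE A (Python) =====
-- def get_peaks_troughs1(h):
--     #波峰
--     peaks = list()
--     #波谷
--     troughs = list()
--     S = 0
--     for x in range(len(h)-1):
--         if S == 0:
--             if h[x] > h[x+1]:
--                 S = 1 ## down
--                 peaks.append((x,h[x]))
--             else:
--                 S = 2 ## up
--                 troughs.append((x,h[x]))
--
--         elif S == 1:
--             if h[x] < h[x+1]:
--                 S = 2
--                 ## from down to up
--                 troughs.append((x,h[x]))
--
--         elif S == 2: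
--             if h[x] > h[x+1]:
--                 S = 1
--                 ## from up to down
--                 peaks.append((x,h[x]))
--
--     ##end point
--     x=len(h)-1
--     if S==1:
--         troughs.append((x,h[x]))
--     else :
--         peaks.append((x,h[x]))
--
--     return peaks,troughs
-- ===== SOURCE B (Python) =====
-- def get_peaks_troughs1(h):
--     end_pt = (len(h) - 1, h[len(h) - 1])
--     # running direction after each adjacent pair: 1 = down, 2 = up; ties keep
--     # the previous direction (the very first tie counts as up)
--     dirs = []
--     for a, b in zip(h, h[1:]):
--         dirs.append(1 if a > b else 2 if a < b else (dirs[-1] if dirs else 2))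
--     # a turning point sits wherever the direction list starts or flips
--     peaks = [(i, h[i]) for i, d in enumerate(dirs) if d == 1 and (i == 0 or dirs[i - 1] == 2)]
--     troughs = [(i, h[i]) for i, d in enumerate(dirs) if d == 2 and (i == 0 or dirs[i - 1] == 1)]
--     if dirs and dirs[-1] == 1:
--         troughs.append(end_pt)
--     else:
--         peaks.append(end_pt)
--     return peaks, troughs
-- ===== Notes on version B (the rewrite author's own statement) =====
-- stated objective: alternative
-- what changed: Replaces A's 3-state state machine that appends turning points while scanning with a two-phase decomposition: first build the list of running direction signs of consecutive pairs (ties inherit the previous direction), then read peaks/troughs off as comprehensions over the start/flip positions of that sign list, appending the endpoint by the final sign.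
import Mathlib
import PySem

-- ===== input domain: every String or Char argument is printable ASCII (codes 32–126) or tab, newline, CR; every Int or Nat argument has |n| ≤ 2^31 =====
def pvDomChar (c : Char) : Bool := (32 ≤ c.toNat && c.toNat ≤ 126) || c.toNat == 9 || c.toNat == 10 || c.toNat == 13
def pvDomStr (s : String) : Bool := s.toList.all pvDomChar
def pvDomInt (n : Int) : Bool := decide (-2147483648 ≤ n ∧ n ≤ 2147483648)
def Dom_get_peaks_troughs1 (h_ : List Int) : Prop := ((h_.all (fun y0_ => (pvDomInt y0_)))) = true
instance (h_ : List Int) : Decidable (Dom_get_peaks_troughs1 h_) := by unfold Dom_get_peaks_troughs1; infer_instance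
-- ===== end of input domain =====

-- B replaces A's in-scan 3-state machine by a two-phase scheme: build the running
-- direction-sign list of consecutive pairs first, then read the turning points off
-- its start/flip positions (objective: alternative decomposition, same cost).

-- ===== PORT A =====
-- the loop body of A's 'for x in range(len(h)-1)' (state = (peaks, troughs, S))
def pvStepA (h_ : List Int) (st : List (Int × Int) × List (Int × Int) × Int) (x : Int) :
    List (Int × Int) × List (Int × Int) × Int :=
  match st with
  | (peaks, troughs, S) =>
    if S = 0 then
      if PySem.List.pyGetD h_ x 0 > PySem.List.pyGetD h_ (x + 1) 0 then
        (peaks ++ [(x, PySem.List.pyGetD h_ x 0)], troughs, 1)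
      else
        (peaks, troughs ++ [(x, PySem.List.pyGetD h_ x 0)], 2)
    else if S = 1 then
      if PySem.List.pyGetD h_ x 0 < PySem.List.pyGetD h_ (x + 1) 0 then
        (peaks, troughs ++ [(x, PySem.List.pyGetD h_ x 0)], 2)
      else (peaks, troughs, S)
    else if S = 2 then
      if PySem.List.pyGetD h_ x 0 > PySem.List.pyGetD h_ (x + 1) 0 then
        (peaks ++ [(x, PySem.List.pyGetD h_ x 0)], troughs, 1)
      else (peaks, troughs, S)
    else (peaks, troughs, S)

def get_peaks_troughs1 (h_ : List Int) : (List (Int × Int)) × (List (Int × Int)) :=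
  let res := (PySem.List.pyRange 0 ((h_.length : Int) - 1) 1).foldl (pvStepA h_) ([], [], 0)
  let x : Int := (h_.length : Int) - 1
  if res.2.2 = 1 then (res.1, res.2.1 ++ [(x, PySem.List.pyGetD h_ x 0)])
  else (res.1 ++ [(x, PySem.List.pyGetD h_ x 0)], res.2.1)

-- ===== PORT B =====
-- one step of B's dirs-building loop: 1 = down, 2 = up, ties keep the previous direction
def pvDirStep (ds : List Int) (ab : Int × Int) : List Int :=
  ds ++ [if ab.1 > ab.2 then 1 else if ab.1 < ab.2 then 2 else ds.getLast?.getD 2]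

def get_peaks_troughs1_alt (h_ : List Int) : (List (Int × Int)) × (List (Int × Int)) :=
  let endPt : Int × Int := ((h_.length : Int) - 1, PySem.List.pyGetD h_ ((h_.length : Int) - 1) 0)
  let dirs : List Int := (h_.zip (PySem.List.slice h_ (some 1) none)).foldl pvDirStep []
  let peaks := ((PySem.List.enumerate dirs 0).filter
      (fun p => p.2 == 1 && (p.1 == 0 || PySem.List.pyGetD dirs (p.1 - 1) 0 == 2))).map
      (fun p => (p.1, PySem.List.pyGetD h_ p.1 0))
  let troughs := ((PySem.List.enumerate dirs 0).filter
      (fun p => p.2 == 2 && (p.1 == 0 || PySem.List.pyGetD dirs (p.1 - 1) 0 == 1))).map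
      (fun p => (p.1, PySem.List.pyGetD h_ p.1 0))
  if !dirs.isEmpty && PySem.List.pyGetD dirs (-1) 0 == 1 then (peaks, troughs ++ [endPt])
  else (peaks ++ [endPt], troughs)

-- ===== PRECONDITION & SPEC =====
-- A raises IndexError (h[-1] on []) exactly on the empty list; B raises there too.
def Pre_get_peaks_troughs1 (h_ : List Int) : Prop := h_ ≠ []
instance (h_ : List Int) : Decidable (Pre_get_peaks_troughs1 h_) := by unfold Pre_get_peaks_troughs1; infer_instance
def pvWitness_get_peaks_troughs1 : List Int := [1, 3, 2, 2, 5]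

def Spec_get_peaks_troughs1 (h_ : List Int) (out : (List (Int × Int)) × (List (Int × Int))) : Prop := out = get_peaks_troughs1_alt h_
instance (h_ : List Int) (out : (List (Int × Int)) × (List (Int × Int))) : Decidable (Spec_get_peaks_troughs1 h_ out) := by unfold Spec_get_peaks_troughs1; infer_instance

-- ===== CLAIM (what is proved, stated in full; the proofs are below) =====
def Claim_equal_get_peaks_troughs1 : Prop := ∀ (h_ : List Int), Dom_get_peaks_troughs1 h_ → Pre_get_peaks_troughs1 h_ → Spec_get_peaks_troughs1 h_ (get_peaks_troughs1 h_)

-- ===== LEMMAS AND PROOFS =====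

-- B's dirs-building fold, over an arbitrary pairs list
def pvDirsOf (ps : List (Int × Int)) : List Int := ps.foldl pvDirStep []

-- B's two comprehensions, as functions of the dirs list
def pvPkB (h_ : List Int) (ds : List Int) : List (Int × Int) :=
  ((PySem.List.enumerate ds 0).filter
      (fun p => p.2 == 1 && (p.1 == 0 || PySem.List.pyGetD ds (p.1 - 1) 0 == 2))).map
      (fun p => (p.1, PySem.List.pyGetD h_ p.1 0))

def pvTrB (h_ : List Int) (ds : List Int) : List (Int × Int) :=
  ((PySem.List.enumerate ds 0).filter
      (fun p => p.2 == 2 && (p.1 == 0 || PySem.List.pyGetD ds (p.1 - 1) 0 == 1))).map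
      (fun p => (p.1, PySem.List.pyGetD h_ p.1 0))

theorem pvDirsOf_append (qs : List (Int × Int)) (q : Int × Int) :
    pvDirsOf (qs ++ [q]) = pvDirsOf qs ++
      [if q.1 > q.2 then 1 else if q.1 < q.2 then 2 else (pvDirsOf qs).getLast?.getD 2] := by
  simp [pvDirsOf, List.foldl_append, pvDirStep]

theorem pvDirsOf_length (ps : List (Int × Int)) : (pvDirsOf ps).length = ps.length := by
  suffices h : ∀ (l : List (Int × Int)) (acc : List Int),
      (l.foldl pvDirStep acc).length = acc.length + l.length by
    simpa using h ps []
  intro l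
  induction l with
  | nil => simp
  | cons p t ih => intro acc; simp [pvDirStep, ih]; omega

theorem pvDirsOf_mem (ps : List (Int × Int)) : ∀ d ∈ pvDirsOf ps, d = 1 ∨ d = 2 := by
  suffices h : ∀ (l : List (Int × Int)) (acc : List Int),
      (∀ d ∈ acc, d = 1 ∨ d = 2) → ∀ d ∈ l.foldl pvDirStep acc, d = 1 ∨ d = 2 by
    exact h ps [] (by simp)
  intro l
  induction l with
  | nil => intro acc hacc; simpa using hacc
  | cons p t ih =>
    intro acc hacc
    simp only [List.foldl_cons]
    refine ih _ ?_
    intro d hd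
    simp only [pvDirStep, List.mem_append, List.mem_singleton] at hd
    rcases hd with hd | hd
    · exact hacc d hd
    · subst hd
      split_ifs with h1 h2
      · left; rfl
      · right; rfl
      · cases hl : acc.getLast? with
        | none => simp
        | some a => simpa using hacc a (List.mem_of_getLast? hl)

-- appending one direction to ds appends (at most) one point to each comprehension
theorem pvPkB_append (h_ : List Int) (ds : List Int) (d : Int) :
    pvPkB h_ (ds ++ [d]) = pvPkB h_ ds ++
      (if d = 1 ∧ ds.getLast?.getD 2 = 2 then
        [((ds.length : Int), PySem.List.pyGetD h_ (ds.length : Int) 0)] else []) := by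
  unfold pvPkB
  rw [PySem.List.enumerate_append, List.filter_append, List.map_append]
  congr 1
  · apply congrArg
    apply List.filter_congr
    intro p hp
    rw [PySem.List.mem_enumerate_iff] at hp
    obtain ⟨j, hj, rfl⟩ := hp
    simp only [zero_add]
    by_cases hj0 : j = 0
    · subst hj0; simp
    · have he : ((j : Int)) - 1 = ((j - 1 : Nat) : Int) := by omega
      rw [he]
      simp [List.getElem?_append_left (show j - 1 < ds.length by omega)]
  · rw [PySem.List.enumerate_cons, PySem.List.enumerate_nil]
    rcases eq_or_ne ds [] with h0 | hne
    · subst h0; by_cases hd : d = 1 <;> simp [hd]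
    · have hlen : ds.length ≠ 0 := by simpa using hne
      have he : ((ds.length : Int)) - 1 = ((ds.length - 1 : Nat) : Int) := by omega
      simp only [zero_add, List.filter_cons, List.filter_nil]
      rw [he]
      have hlt : ds.length - 1 < ds.length := by omega
      have hgd : PySem.List.pyGetD (ds ++ [d]) ((ds.length - 1 : Nat) : Int) 0
          = ds.getLast hne := by
        rw [PySem.List.pyGetD_natCast, List.getD_append _ _ _ _ hlt,
          List.getD_eq_getElem _ _ hlt, List.getLast_eq_getElem]
      rw [hgd, List.getLast?_eq_some_getLast hne]
      by_cases hd : d = 1 <;> by_cases hx : ds.getLast hne = 2 <;>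
        simp [hd, hx, hlen]

theorem pvTrB_append (h_ : List Int) (ds : List Int) (d : Int) :
    pvTrB h_ (ds ++ [d]) = pvTrB h_ ds ++
      (if d = 2 ∧ ds.getLast?.getD 1 = 1 then
        [((ds.length : Int), PySem.List.pyGetD h_ (ds.length : Int) 0)] else []) := by
  unfold pvTrB
  rw [PySem.List.enumerate_append, List.filter_append, List.map_append]
  congr 1
  · apply congrArg
    apply List.filter_congr
    intro p hp
    rw [PySem.List.mem_enumerate_iff] at hp
    obtain ⟨j, hj, rfl⟩ := hp
    simp only [zero_add]
    by_cases hj0 : j = 0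
    · subst hj0; simp
    · have he : ((j : Int)) - 1 = ((j - 1 : Nat) : Int) := by omega
      rw [he]
      simp [List.getElem?_append_left (show j - 1 < ds.length by omega)]
  · rw [PySem.List.enumerate_cons, PySem.List.enumerate_nil]
    rcases eq_or_ne ds [] with h0 | hne
    · subst h0; by_cases hd : d = 2 <;> simp [hd]
    · have hlen : ds.length ≠ 0 := by simpa using hne
      have he : ((ds.length : Int)) - 1 = ((ds.length - 1 : Nat) : Int) := by omega
      simp only [zero_add, List.filter_cons, List.filter_nil]
      rw [he]
      have hlt : ds.length - 1 < ds.length := by omega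
      have hgd : PySem.List.pyGetD (ds ++ [d]) ((ds.length - 1 : Nat) : Int) 0
          = ds.getLast hne := by
        rw [PySem.List.pyGetD_natCast, List.getD_append _ _ _ _ hlt,
          List.getD_eq_getElem _ _ hlt, List.getLast_eq_getElem]
      rw [hgd, List.getLast?_eq_some_getLast hne]
      by_cases hd : d = 2 <;> by_cases hx : ds.getLast hne = 1 <;>
        simp [hd, hx, hlen]

-- one A-step from the state described by a dirs list lands in the state of the extended dirs list
theorem pvStepA_dirs (h_ : List Int) (ds : List Int) (a b : Int)
    (hds : ∀ d ∈ ds, d = 1 ∨ d = 2)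
    (ha : PySem.List.pyGetD h_ (ds.length : Int) 0 = a)
    (hb : PySem.List.pyGetD h_ ((ds.length : Int) + 1) 0 = b) :
    pvStepA h_ (pvPkB h_ ds, pvTrB h_ ds, ds.getLast?.getD 0) ((ds.length : Int)) =
      (pvPkB h_ (ds ++ [if a > b then 1 else if a < b then 2 else ds.getLast?.getD 2]),
       pvTrB h_ (ds ++ [if a > b then 1 else if a < b then 2 else ds.getLast?.getD 2]),
       if a > b then 1 else if a < b then 2 else ds.getLast?.getD 2) := by
  rw [pvPkB_append, pvTrB_append]
  rcases hl : ds.getLast? with _ | s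
  · have hds0 : ds = [] := List.getLast?_eq_none_iff.mp hl
    subst hds0
    simp only [List.length_nil, Nat.cast_zero] at ha hb ⊢
    have hb' : PySem.List.pyGetD h_ 1 0 = b := by simpa using hb
    by_cases hab : a > b
    · simp [pvStepA, ha, hb', hab]
    · by_cases hba : a < b <;> simp [pvStepA, ha, hb', hab, hba]
  · rcases hds s (List.mem_of_getLast? hl) with rfl | rfl
    · by_cases hba : a < b
      · have hab : ¬ a > b := by omega
        simp [pvStepA, ha, hb, hab, hba]
      · by_cases hab : a > b <;> simp [pvStepA, ha, hb, hab, hba, hl]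
    · by_cases hab : a > b
      · simp [pvStepA, ha, hb, hab]
      · by_cases hba : a < b <;> simp [pvStepA, ha, hb, hab, hba, hl]

theorem pvMain (h_ : List Int) (k : Nat) (hk : k ≤ (h_.zip h_.tail).length) :
    (PySem.List.pyRange 0 (k : Int) 1).foldl (pvStepA h_) ([], [], 0) =
      (pvPkB h_ (pvDirsOf ((h_.zip h_.tail).take k)),
       pvTrB h_ (pvDirsOf ((h_.zip h_.tail).take k)),
       (pvDirsOf ((h_.zip h_.tail).take k)).getLast?.getD 0) := by
  induction k with
  | zero =>
    rw [show ((0 : Nat) : Int) = 0 by norm_num, PySem.List.pyRange_one_eq_nil le_rfl]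
    simp [pvDirsOf, pvPkB, pvTrB, PySem.List.enumerate_nil]
  | succ k ih =>
    have hk1 : k < (h_.zip h_.tail).length := by omega
    have hkh : k + 1 < h_.length := by
      have hzl : (h_.zip h_.tail).length = min h_.length (h_.length - 1) := by
        simp [List.length_zip, List.length_tail]
      rw [hzl] at hk1; omega
    have hcast : ((k + 1 : Nat) : Int) = (k : Int) + 1 := by push_cast; ring
    rw [hcast, PySem.List.pyRange_one_succ_right (by positivity), List.foldl_append,
      ih (by omega), List.take_succ_eq_append_getElem hk1]
    have hpk : (h_.zip h_.tail)[k] = (h_[k]'(by omega), h_[k + 1]'hkh) := by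
      rw [List.getElem_zip]
      exact congrArg _ (List.getElem_tail _)
    rw [hpk, pvDirsOf_append]
    have hdslen : ((pvDirsOf ((h_.zip h_.tail).take k)).length : Int) = (k : Int) := by
      rw [pvDirsOf_length, List.length_take]; congr 1; omega
    have hstep := pvStepA_dirs h_ (pvDirsOf ((h_.zip h_.tail).take k))
      (h_[k]'(by omega)) (h_[k + 1]'hkh) (pvDirsOf_mem _)
      (by rw [hdslen, PySem.List.pyGetD_natCast, List.getD_eq_getElem _ _ (by omega)])
      (by
        rw [hdslen, show ((k : Int) + 1) = ((k + 1 : Nat) : Int) by push_cast; ring,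
          PySem.List.pyGetD_natCast, List.getD_eq_getElem _ _ hkh])
    rw [hdslen] at hstep
    simp only [List.foldl_cons, List.foldl_nil]
    rw [hstep]
    simp [List.getLast?_append]

-- ===== VERDICT (by name: the statement is the Claim_ definition above) =====
theorem get_peaks_troughs1_spec : Claim_equal_get_peaks_troughs1 := by
  unfold Claim_equal_get_peaks_troughs1 Spec_get_peaks_troughs1
  intro h_ _ hpre
  have hlen1 : 1 ≤ h_.length := List.length_pos_iff.mpr hpre
  unfold get_peaks_troughs1 get_peaks_troughs1_alt
  rw [PySem.List.slice_from_one]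
  have hzl : (h_.zip h_.tail).length = h_.length - 1 := by
    simp [List.length_zip, List.length_tail]
  have hcast : ((h_.length : Int) - 1) = (((h_.zip h_.tail).length : Nat) : Int) := by
    rw [hzl]; omega
  rw [hcast, pvMain h_ (h_.zip h_.tail).length le_rfl, List.take_length]
  have hcond : ∀ (l : List Int),
      (!l.isEmpty && (PySem.List.pyGetD l (-1) 0 == 1)) = decide (l.getLast?.getD 0 = 1) := by
    intro l
    rcases eq_or_ne l [] with rfl | hne
    · simp [PySem.List.pyGetD, PySem.List.pyGet?, PySem.List.pyIdx?]
    · rw [PySem.List.pyGetD_neg_one l 0 hne, List.getLast?_eq_some_getLast hne]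
      by_cases hg : l.getLast hne = 1 <;> simp [hne, hg]
  simp only [pvPkB, pvTrB, pvDirsOf, hcond, decide_eq_true_eq]
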